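-- pv_equiv track=rewrite | github.com/Darksword333/Python-Project | archive/archives/mare.py | grille_milieu
-- ===== SOURCE A (Python) =====
-- def grille_vide(n):
--     """   paramètre: n entier (dimension de la grille carree)
--     valeur retournée:  tableau nxn réprésentant une  grille  de caractères vide:
--     """
--     grille = [[' ' for i in range(n)] for j in range(n)]
--     return grille
--
-- def placer_dans_ligne(ligne_grille,jdebut,jfin,jpas,symbole):
--     """
--     parametres ligne_grille  (tableau de caracteres): une ligne dans la grille
--                jdebut,jfin,jpas  (entiers): colonnes j  jdebut<=j<jfin avec un pas jpas
--                symbole (type caractere  '*' ou 'o')  a placer dans les cases (i,j)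
--     placement symbole ('*' ou  'o')  sur portion de ligne jdebut à jfin avec un pas jpas
--     """
--     for j in range(jdebut,jfin,jpas):
--         ligne_grille[j] = symbole
--
-- def placer_dans_colonne(grille,j,idebut,ifin,ipas,symbole):
--     """
--     parametres  grille: une grille du jeu
--                 j  (entier): numero colonne dans la grille
--                idebut,ifin,ipas  (entiers): lignes i  idebut<=i<ifin avec un pas ipas
--                symbole (type caractere  '*' ou 'o')  a placer dans les cases (i,j)
--     placement  symbole  ('*' ou  'o') sur  portion de colonne  idebut à ifin avec un pas ipas
-- ;;;;;"""
--     for i in range(idebut,ifin,ipas):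
--         grille[i][j] = symbole
--
-- def grille_milieu(n):
--     """ grille milieu jeu
--     paramètre: n entier (dimension de la grille carree)
--     valeur retournée: un tableau nxn réprésentant la grille milieu jeu suivante
--
--             0  1  2  3  4  5  6
--          0  *  *  *        *
--          1  *  *  *
--          2        *     *                        15 pions '*'
--          3           *  *  o  o                  15 pions 'o'
--          4     *        o  o  o
--          5  *  *     o  o  o  o
--          6  *  o  o  o  o  o  o
--     """
--     grille = grille_vide(n)   # creation grille vide
--     for i in range(2):    #pour (i,j)=(0,0),(0,1),(0,2),(1,0),(1,1),(1,2)
--         placer_dans_ligne(grille[i],0,3,1,'*')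
--     grille[0][5] = '*'
--     placer_dans_ligne(grille[2],2,5,2,'*')  #pour (i,j)=(2,2),(2,4)
--     placer_dans_ligne(grille[3],3,5,1,'*')  #pour (i,j)=(3,3),(3,4)
--     placer_dans_ligne(grille[3],5,7,1,'o')  #pour (i,j)=(3,5),(3,6)
--     placer_dans_colonne(grille,0,5,7,1,'*') #pour (i,j)=(5,0),(6,0)
--     placer_dans_colonne(grille,1,4,6,1,'*') #pour (i,j)=(4,1),(5,1)
--     placer_dans_ligne(grille[4],4,7,1,'o')  #pour (i,j)=(4,4),(4,5),(4,6)
--     placer_dans_ligne(grille[5],3,7,1,'o')  #pour (i,j)=(5,3),(5,4),(5,5),(5,6)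
--     placer_dans_ligne(grille[6],1,7,1,'o')  #pour (i,j)=(6,1),(6,2),(6,3),(6,4),(6,5),(6,6)
--     return grille
-- ===== SOURCE B (Python) =====
-- PIECES = {(0, 0): '*', (0, 1): '*', (0, 2): '*', (0, 5): '*',
--           (1, 0): '*', (1, 1): '*', (1, 2): '*',
--           (2, 2): '*', (2, 4): '*',
--           (3, 3): '*', (3, 4): '*',
--           (4, 1): '*',
--           (5, 0): '*', (5, 1): '*',
--           (6, 0): '*',
--           (3, 5): 'o', (3, 6): 'o',
--           (4, 4): 'o', (4, 5): 'o', (4, 6): 'o',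
--           (5, 3): 'o', (5, 4): 'o', (5, 5): 'o', (5, 6): 'o',
--           (6, 1): 'o', (6, 2): 'o', (6, 3): 'o', (6, 4): 'o', (6, 5): 'o', (6, 6): 'o'}
--
-- def grille_milieu(n):
--     grille = [[' '] * n for _ in range(n)]
--     for (i, j), s in PIECES.items():
--         grille[i][j] = s
--     return grille
-- ===== Notes on version B (the rewrite author's own statement) =====
-- stated objective: simpler
-- what changed: B replaces A's three row/column range-placement helpers and eleven placement calls with one literal coordinate-to-symbol table and a single uniform fill loop over it.
import Mathlib
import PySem

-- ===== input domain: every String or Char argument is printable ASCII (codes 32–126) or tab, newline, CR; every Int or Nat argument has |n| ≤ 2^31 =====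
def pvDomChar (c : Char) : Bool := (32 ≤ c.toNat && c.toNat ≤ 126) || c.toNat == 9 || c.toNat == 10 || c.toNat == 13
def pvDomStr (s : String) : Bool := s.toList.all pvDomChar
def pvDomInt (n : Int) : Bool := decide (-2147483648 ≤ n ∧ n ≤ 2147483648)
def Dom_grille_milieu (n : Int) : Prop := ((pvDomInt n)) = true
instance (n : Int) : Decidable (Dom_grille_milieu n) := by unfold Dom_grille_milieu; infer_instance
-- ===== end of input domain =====

-- B fills the empty grid with one uniform loop over a literal coordinate→symbol table instead of
-- A's three row/column range-placement helpers and eleven placement calls (objective: simpler).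

-- ===== PORT A =====
-- All indices A actually uses are nonnegative and (under Pre_) in range, where List.set/List.modify
-- are exact ports of Python's `l[j] = s` (which would raise only out of range, excluded by Pre_).
def pvGrilleVide (n : Int) : List (List String) :=
  (PySem.List.pyRange 0 n 1).map (fun _j => (PySem.List.pyRange 0 n 1).map (fun _i => " "))

def pvPlacerDansLigne (ligne_grille : List String) (jdebut jfin jpas : Int) (symbole : String) : List String :=
  (PySem.List.pyRange jdebut jfin jpas).foldl (fun l j => l.set j.toNat symbole) ligne_grille

def pvPlacerDansColonne (grille : List (List String)) (j idebut ifin ipas : Int) (symbole : String) : List (List String) :=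
  (PySem.List.pyRange idebut ifin ipas).foldl (fun g i => g.modify i.toNat (fun r => r.set j.toNat symbole)) grille

def grille_milieu (n : Int) : List (List String) :=
  let g0 := pvGrilleVide n
  let g1 := (PySem.List.pyRange 0 2 1).foldl (fun g i => g.modify i.toNat (fun r => pvPlacerDansLigne r 0 3 1 "*")) g0
  let g2 := g1.modify 0 (fun r => r.set 5 "*")
  let g3 := g2.modify 2 (fun r => pvPlacerDansLigne r 2 5 2 "*")
  let g4 := g3.modify 3 (fun r => pvPlacerDansLigne r 3 5 1 "*")
  let g5 := g4.modify 3 (fun r => pvPlacerDansLigne r 5 7 1 "o")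
  let g6 := pvPlacerDansColonne g5 0 5 7 1 "*"
  let g7 := pvPlacerDansColonne g6 1 4 6 1 "*"
  let g8 := g7.modify 4 (fun r => pvPlacerDansLigne r 4 7 1 "o")
  let g9 := g8.modify 5 (fun r => pvPlacerDansLigne r 3 7 1 "o")
  let g10 := g9.modify 6 (fun r => pvPlacerDansLigne r 1 7 1 "o")
  g10

-- ===== PORT B =====
-- the Python dict literal PIECES, as an association list in insertion order
def pvPieces : List ((Int × Int) × String) :=
  [((0,0),"*"), ((0,1),"*"), ((0,2),"*"), ((0,5),"*"),
   ((1,0),"*"), ((1,1),"*"), ((1,2),"*"),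
   ((2,2),"*"), ((2,4),"*"),
   ((3,3),"*"), ((3,4),"*"),
   ((4,1),"*"),
   ((5,0),"*"), ((5,1),"*"),
   ((6,0),"*"),
   ((3,5),"o"), ((3,6),"o"),
   ((4,4),"o"), ((4,5),"o"), ((4,6),"o"),
   ((5,3),"o"), ((5,4),"o"), ((5,5),"o"), ((5,6),"o"),
   ((6,1),"o"), ((6,2),"o"), ((6,3),"o"), ((6,4),"o"), ((6,5),"o"), ((6,6),"o")]

-- every written index is nonnegative and (under Pre_) in range, where List.set/List.modify are exact
-- ports of Python's `grille[i][j] = s` (which would raise only out of range, excluded by Pre_)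
def grille_milieu_alt (n : Int) : List (List String) :=
  let grille := (PySem.List.pyRange 0 n 1).map (fun _ => List.replicate n.toNat " ")
  pvPieces.foldl (fun g p => g.modify p.1.1.toNat (fun r => r.set p.1.2.toNat p.2)) grille

-- ===== PRECONDITION & SPEC =====
-- Pre_ excludes exactly the n < 7 on which A raises IndexError (a placement writes past a row or past
-- the grid); B simply returns the grid restricted to those coordinates there.
def Pre_grille_milieu (n : Int) : Prop := 7 ≤ n
instance (n : Int) : Decidable (Pre_grille_milieu n) := by unfold Pre_grille_milieu; infer_instance
def pvWitness_grille_milieu : Int := 7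

def Spec_grille_milieu (n : Int) (out : List (List String)) : Prop := out = grille_milieu_alt n
instance (n : Int) (out : List (List String)) : Decidable (Spec_grille_milieu n out) := by unfold Spec_grille_milieu; infer_instance

-- ===== CLAIM (what is proved, stated in full; the proofs are below) =====
def Claim_equal_grille_milieu : Prop := ∀ (n : Int), Dom_grille_milieu n → Pre_grille_milieu n → Spec_grille_milieu n (grille_milieu n)

-- ===== LEMMAS AND PROOFS =====

-- the padding of every row beyond column 6, and the 7×7 literal core both programs produce
def pvT (n : Int) : List String := (PySem.List.pyRange 7 n 1).map (fun _ => " ")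
def pvSp7 : List String := [" ", " ", " ", " ", " ", " ", " "]
def pvLit7 : List (List String) :=
  [["*","*","*"," "," ","*"," "],
   ["*","*","*"," "," "," "," "],
   [" "," ","*"," ","*"," "," "],
   [" "," "," ","*","*","o","o"],
   [" ","*"," "," ","o","o","o"],
   ["*","*"," ","o","o","o","o"],
   ["*","o","o","o","o","o","o"]]

lemma pvSplit (n : Int) (h : 7 ≤ n) :
    PySem.List.pyRange 0 n 1 = [0,1,2,3,4,5,6] ++ PySem.List.pyRange 7 n 1 := by
  rw [PySem.List.pyRange_one_append 0 7 n (by norm_num) h]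
  rfl

lemma A_decomp (n : Int) (h : 7 ≤ n) :
    grille_milieu n
      = pvLit7.map (fun r => r ++ pvT n)
        ++ (PySem.List.pyRange 7 n 1).map (fun _ => pvSp7 ++ pvT n) := by
  unfold grille_milieu pvGrilleVide pvPlacerDansLigne pvPlacerDansColonne
  simp only [pvSplit n h]
  simp [pvLit7, pvT, pvSp7, List.modify,
        show PySem.List.pyRange 0 2 1 = [0,1] from rfl,
        show PySem.List.pyRange 0 3 1 = [0,1,2] from rfl,
        show PySem.List.pyRange 2 5 2 = [2,4] from rfl,
        show PySem.List.pyRange 3 5 1 = [3,4] from rfl,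
        show PySem.List.pyRange 5 7 1 = [5,6] from rfl,
        show PySem.List.pyRange 4 6 1 = [4,5] from rfl,
        show PySem.List.pyRange 4 7 1 = [4,5,6] from rfl,
        show PySem.List.pyRange 3 7 1 = [3,4,5,6] from rfl,
        show PySem.List.pyRange 1 7 1 = [1,2,3,4,5,6] from rfl]

lemma pvT_eq (n : Int) : pvT n = List.replicate (n - 7).toNat " " := by
  unfold pvT
  rw [List.map_const', PySem.List.length_pyRange_one]

lemma pvRep (n : Int) (h : 7 ≤ n) : List.replicate n.toNat " " = pvSp7 ++ pvT n := by
  rw [pvT_eq n]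
  have hn : n.toNat = 7 + (n - 7).toNat := by omega
  rw [hn, List.replicate_add]
  rfl

lemma B_decomp (n : Int) (h : 7 ≤ n) :
    grille_milieu_alt n
      = pvLit7.map (fun r => r ++ pvT n)
        ++ (PySem.List.pyRange 7 n 1).map (fun _ => pvSp7 ++ pvT n) := by
  unfold grille_milieu_alt
  simp only [pvSplit n h, pvRep n h, List.map_append]
  simp [pvPieces, pvLit7, pvSp7, List.modify]

-- ===== VERDICT (by name: the statement is the Claim_ definition above) =====
theorem grille_milieu_spec : Claim_equal_grille_milieu := by
  intro n _ hp
  unfold Spec_grille_milieu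
  rw [A_decomp n hp, B_decomp n hp]
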